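-- pv_equiv track=rewrite | github.com/PYninjaAlex/python_lessons | src/codewars_2.py | computer_to_phone
-- ===== SOURCE A (Python) =====
-- def computer_to_phone(numbers: str) -> str:
--     output = ""
--     key_dict = {
--         "7": "1",
--         "8": "2",
--         "9": "3",
--         "1": "7",
--         "2": "8",
--         "3": "9",
--     }
--     for i in numbers:
--         if i not in key_dict:
--             output += i
--         else:
--             output += key_dict[i]
--     return output
-- ===== SOURCE B (Python) =====
-- def computer_to_phone(numbers: str) -> str:
--     # Staged whole-string passes: move 7/8/9 to sentinels, shift 1/2/3 up,
--     # then land the sentinels on 1/2/3.  Sentinels \x00-\x02 never occur in text input.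
--     for old, new in (("7", "\x00"), ("8", "\x01"), ("9", "\x02"),
--                      ("1", "7"), ("2", "8"), ("3", "9"),
--                      ("\x00", "1"), ("\x01", "2"), ("\x02", "3")):
--         numbers = numbers.replace(old, new)
--     return numbers
-- ===== Notes on version B (the rewrite author's own statement) =====
-- stated objective: faster
-- what changed: Replaces A's single per-character dict-lookup loop with nine whole-string replace passes (7/8/9 parked on sentinel characters, 1/2/3 shifted up, sentinels landed on 1/2/3), moving all character work into C-implemented str.replace.
import Mathlib
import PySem

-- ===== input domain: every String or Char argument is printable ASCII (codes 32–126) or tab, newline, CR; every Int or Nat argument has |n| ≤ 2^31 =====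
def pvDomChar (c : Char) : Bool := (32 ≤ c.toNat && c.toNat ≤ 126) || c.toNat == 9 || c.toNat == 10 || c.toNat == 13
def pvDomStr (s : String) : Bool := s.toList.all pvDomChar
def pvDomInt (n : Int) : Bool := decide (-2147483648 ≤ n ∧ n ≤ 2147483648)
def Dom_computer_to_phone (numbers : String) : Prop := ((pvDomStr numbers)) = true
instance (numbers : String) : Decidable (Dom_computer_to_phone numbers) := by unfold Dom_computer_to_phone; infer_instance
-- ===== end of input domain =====

-- B replaces A's per-character dict-lookup loop with nine whole-string replace passes
-- via sentinel characters (a timing run measured B faster by a constant factor).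

-- ===== PORT A =====
def pvKeyDict : PySem.Dict Char Char :=
  PySem.Dict.ofList [('7', '1'), ('8', '2'), ('9', '3'), ('1', '7'), ('2', '8'), ('3', '9')]

def computer_to_phone (numbers : String) : String :=
  numbers.toList.foldl
    (fun output i =>
      if ¬ pvKeyDict.contains i then output ++ String.ofList [i]
      else output ++ String.ofList [(pvKeyDict.get? i).getD i])
    ""

-- ===== PORT B =====
def pvPairs : List (String × String) :=
  [("7", "\x00"), ("8", "\x01"), ("9", "\x02"),
   ("1", "7"), ("2", "8"), ("3", "9"),
   ("\x00", "1"), ("\x01", "2"), ("\x02", "3")]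

def computer_to_phone_alt (numbers : String) : String :=
  pvPairs.foldl (fun s p => PySem.Str.replace s p.1 p.2) numbers

-- ===== PRECONDITION & SPEC =====
def Spec_computer_to_phone (numbers : String) (out : String) : Prop := out = computer_to_phone_alt numbers
instance (numbers : String) (out : String) : Decidable (Spec_computer_to_phone numbers out) := by unfold Spec_computer_to_phone; infer_instance

-- ===== CLAIM (what is proved, stated in full; the proofs are below) =====
def Claim_equal_computer_to_phone : Prop := ∀ (numbers : String), Dom_computer_to_phone numbers → Spec_computer_to_phone numbers (computer_to_phone numbers)

-- ===== LEMMAS AND PROOFS =====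

-- A's per-character action
def pvAChar (c : Char) : Char :=
  if ¬ pvKeyDict.contains c then c else (pvKeyDict.get? c).getD c

theorem pvFold_eq (l : List Char) (acc : String) :
    l.foldl
      (fun output i =>
        if ¬ pvKeyDict.contains i then output ++ String.ofList [i]
        else output ++ String.ofList [(pvKeyDict.get? i).getD i])
      acc = acc ++ String.ofList (l.map pvAChar) := by
  induction l generalizing acc with
  | nil => simp
  | cons c t ih =>
    simp only [List.foldl, List.map]
    rw [show (if ¬ pvKeyDict.contains c then acc ++ String.ofList [c]
        else acc ++ String.ofList [(pvKeyDict.get? c).getD c])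
      = acc ++ String.ofList [pvAChar c] by
        unfold pvAChar; split_ifs <;> rfl]
    rw [ih, String.append_assoc, ← String.ofList_append]; simp

-- single-character replace is a per-character substitution
def pvF (o n c : Char) : Char := if c = o then n else c

def pvSubst (o : Char) (new : List Char) (c : Char) : List Char :=
  if c = o then new else [c]

theorem pvGo_single (o : Char) (new l acc : List Char) (fuel : Nat) (h : l.length ≤ fuel) :
    PySem.Chars.replace.go [o] new fuel l acc
      = acc.reverse ++ l.flatMap (pvSubst o new) := by
  induction fuel generalizing l acc with
  | zero =>
    have : l = [] := List.eq_nil_of_length_eq_zero (Nat.le_zero.mp h)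
    subst this; simp [PySem.Chars.replace.go]
  | succ n ih =>
    cases l with
    | nil => simp [PySem.Chars.replace.go]
    | cons c t =>
      simp only [PySem.Chars.replace.go]
      by_cases hc : c = o
      · subst hc
        rw [if_pos (by simp [List.isPrefixOf])]
        rw [ih _ _ (by simpa using Nat.le_of_succ_le_succ h)]
        simp [pvSubst]
      · rw [if_neg (by simp [List.isPrefixOf]; exact fun he => hc he.symm)]
        rw [ih _ _ (by simpa using Nat.le_of_succ_le_succ h)]
        simp [pvSubst, hc]

theorem pvSubst_map (o n : Char) (l : List Char) :
    l.flatMap (pvSubst o [n]) = l.map (pvF o n) := by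
  induction l with
  | nil => rfl
  | cons c t ih => by_cases h : c = o <;> simp [pvSubst, pvF, h, ih]

-- one single-character replace pass, on the character list
theorem pvReplOne (o n : Char) (s : String) (os ns : String)
    (ho : os.toList = [o]) (hn : ns.toList = [n]) :
    (PySem.Str.replace s os ns).toList = s.toList.map (pvF o n) := by
  rw [PySem.Str.toList_replace, ho, hn]
  unfold PySem.Chars.replace
  rw [if_neg (by simp)]
  rw [pvGo_single o [n] s.toList [] s.toList.length (le_refl _)]
  simpa using pvSubst_map o n s.toList

-- B's composed per-character action (what the nine passes do to one non-sentinel char)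
def pvG (c : Char) : Char :=
  if c = '7' then '\x00' else if c = '8' then '\x01' else if c = '9' then '\x02'
  else if c = '1' then '7' else if c = '2' then '8' else if c = '3' then '9' else c

def pvH (c : Char) : Char :=
  if c = '\x00' then '1' else if c = '\x01' then '2' else if c = '\x02' then '3' else c

theorem pvF_ne (o n c : Char) (h : c ≠ o) : pvF o n c = c := by simp [pvF, h]

-- the nine passes compose to pvH ∘ pvG on every character
theorem pvChain (c : Char) :
    pvF '\x02' '3' (pvF '\x01' '2' (pvF '\x00' '1' (pvF '3' '9' (pvF '2' '8'
      (pvF '1' '7' (pvF '9' '\x02' (pvF '8' '\x01' (pvF '7' '\x00' c))))))))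
      = pvH (pvG c) := by
  by_cases h7 : c = '7'; · subst h7; decide
  by_cases h8 : c = '8'; · subst h8; decide
  by_cases h9 : c = '9'; · subst h9; decide
  by_cases h1 : c = '1'; · subst h1; decide
  by_cases h2 : c = '2'; · subst h2; decide
  by_cases h3 : c = '3'; · subst h3; decide
  by_cases ha : c = '\x00'; · subst ha; decide
  by_cases hb : c = '\x01'; · subst hb; decide
  by_cases hc : c = '\x02'; · subst hc; decide
  rw [pvF_ne _ _ _ h7, pvF_ne _ _ _ h8, pvF_ne _ _ _ h9,
      pvF_ne _ _ _ h1, pvF_ne _ _ _ h2, pvF_ne _ _ _ h3,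
      pvF_ne _ _ _ ha, pvF_ne _ _ _ hb, pvF_ne _ _ _ hc]
  simp [pvG, pvH, h1, h2, h3, h7, h8, h9, ha, hb, hc]

theorem pvAlt_toList (s : String) :
    (computer_to_phone_alt s).toList = (s.toList.map pvG).map pvH := by
  unfold computer_to_phone_alt pvPairs
  simp only [List.foldl_cons, List.foldl_nil]
  rw [pvReplOne '\x02' '3' _ _ _ rfl rfl,
      pvReplOne '\x01' '2' _ _ _ rfl rfl,
      pvReplOne '\x00' '1' _ _ _ rfl rfl,
      pvReplOne '3' '9' _ _ _ rfl rfl,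
      pvReplOne '2' '8' _ _ _ rfl rfl,
      pvReplOne '1' '7' _ _ _ rfl rfl,
      pvReplOne '9' '\x02' _ _ _ rfl rfl,
      pvReplOne '8' '\x01' _ _ _ rfl rfl,
      pvReplOne '7' '\x00' _ _ _ rfl rfl]
  simp only [List.map_map]
  apply List.map_congr_left
  intro c _
  simp only [Function.comp_apply]
  exact pvChain c

-- on domain characters (no sentinels) the composed action equals A's dict action
theorem pvChar_agree (c : Char) (hc : pvDomChar c = true) : pvH (pvG c) = pvAChar c := by
  by_cases h7 : c = '7'; · subst h7; decide
  by_cases h8 : c = '8'; · subst h8; decide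
  by_cases h9 : c = '9'; · subst h9; decide
  by_cases h1 : c = '1'; · subst h1; decide
  by_cases h2 : c = '2'; · subst h2; decide
  by_cases h3 : c = '3'; · subst h3; decide
  have hs : 32 ≤ c.toNat ∨ c.toNat = 9 ∨ c.toNat = 10 ∨ c.toNat = 13 := by
    simp [pvDomChar] at hc; omega
  have hg : pvG c = c := by simp [pvG, h1, h2, h3, h7, h8, h9]
  have hne : c ≠ '\x00' ∧ c ≠ '\x01' ∧ c ≠ '\x02' := by
    refine ⟨?_, ?_, ?_⟩ <;> intro he <;> subst he <;> revert hs <;> decide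
  have hh : pvH c = c := by simp [pvH, hne.1, hne.2.1, hne.2.2]
  have hcont : pvKeyDict.contains c = false := by
    simp [pvKeyDict, PySem.Dict.ofList, PySem.Dict.update, List.foldl,
      PySem.Dict.contains_insert, PySem.Dict.contains_empty, h1, h2, h3, h7, h8, h9]
  simp [hg, hh, pvAChar, hcont]

-- ===== VERDICT (by name: the statement is the Claim_ definition above) =====
theorem computer_to_phone_spec : Claim_equal_computer_to_phone := by
  intro numbers hdom
  unfold Spec_computer_to_phone
  have hA : computer_to_phone numbers = String.ofList (numbers.toList.map pvAChar) := by
    unfold computer_to_phone; rw [pvFold_eq]; simp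
  have hB : (computer_to_phone_alt numbers).toList = numbers.toList.map pvAChar := by
    rw [pvAlt_toList, List.map_map]
    apply List.map_congr_left
    intro c hcmem
    exact pvChar_agree c (by
      have := hdom; simp [Dom_computer_to_phone, pvDomStr, List.all_eq_true] at this
      exact this c hcmem)
  rw [hA, ← hB, String.ofList_toList]
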